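-- pv_equiv track=rewrite | github.com/opendr-eu/opendr | src/opendr/perception/object_tracking_3d/single_object_tracking/vpit/second_detector/run.py | feature_to_image_coordinates
-- ===== SOURCE A (Python) =====
-- def feature_to_image_coordinates(
--     pos, feature_blocks, overwrite_strides=None, upscaling_mode="none"
-- ):
--
--     result = pos
--
--     upper_limit = (
--         min(1, feature_blocks)
--         if upscaling_mode in ["raw", "processed"]
--         else feature_blocks
--     )
--
--     for i in range(upper_limit):
--         stride = 2 if overwrite_strides is None else overwrite_strides[i]
--         result = result * stride
--
--     return result
-- ===== SOURCE B (Python) =====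
-- def feature_to_image_coordinates(
--     pos, feature_blocks, overwrite_strides=None, upscaling_mode="none"
-- ):
--     capped = upscaling_mode == "raw" or upscaling_mode == "processed"
--     n = 1 if (capped and feature_blocks > 1) else feature_blocks
--     if n <= 0:
--         return pos
--     if overwrite_strides is None:
--         return pos * 2 ** n
--     factor = 1
--     for stride in reversed(overwrite_strides[:n]):
--         factor = stride * factor
--     return pos * factor
-- ===== Notes on version B (the rewrite author's own statement) =====
-- stated objective: alternative
-- what changed: B replaces A's forward index loop that repeatedly rescales pos: it guards the degenerate bound once, uses the closed form pos*2**n when no strides are given, and otherwise builds the scale factor back-to-front over the reversed stride prefix and applies it with one final multiply.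
import Mathlib
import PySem

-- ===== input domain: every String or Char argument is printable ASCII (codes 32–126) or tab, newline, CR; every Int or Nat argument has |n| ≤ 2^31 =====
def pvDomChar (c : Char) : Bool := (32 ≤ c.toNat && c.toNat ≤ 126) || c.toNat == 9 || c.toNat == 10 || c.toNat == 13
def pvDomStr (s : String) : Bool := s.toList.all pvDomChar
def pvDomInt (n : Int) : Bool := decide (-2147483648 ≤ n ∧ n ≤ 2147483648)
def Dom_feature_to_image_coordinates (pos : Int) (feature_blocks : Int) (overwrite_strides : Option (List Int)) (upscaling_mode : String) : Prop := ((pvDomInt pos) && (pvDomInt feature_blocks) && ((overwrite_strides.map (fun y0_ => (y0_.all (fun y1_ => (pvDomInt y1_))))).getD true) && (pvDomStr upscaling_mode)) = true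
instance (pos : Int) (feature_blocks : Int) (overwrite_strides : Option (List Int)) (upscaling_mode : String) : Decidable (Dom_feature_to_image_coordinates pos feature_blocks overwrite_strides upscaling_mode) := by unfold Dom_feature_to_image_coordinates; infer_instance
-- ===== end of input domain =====

-- B computes the scale factor separately (closed-form 2^n, or a recursive prefix-product over the strides) and applies it with one final multiply, instead of rescaling pos inside an index loop.

-- ===== PORT A =====
def feature_to_image_coordinates (pos : Int) (feature_blocks : Int) (overwrite_strides : Option (List Int)) (upscaling_mode : String) : Int :=
  let upper_limit : Int :=
    if upscaling_mode = "raw" ∨ upscaling_mode = "processed" then min 1 feature_blocks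
    else feature_blocks
  (PySem.List.pyRange 0 upper_limit 1).foldl
    (fun result i =>
      let stride : Int :=
        match overwrite_strides with
        | none => 2
        | some l => PySem.List.pyGetD l i 0   -- in range under Pre_ (Python raises IndexError otherwise)
      result * stride)
    pos

-- ===== PORT B =====
def feature_to_image_coordinates_alt (pos : Int) (feature_blocks : Int) (overwrite_strides : Option (List Int)) (upscaling_mode : String) : Int :=
  let capped : Bool := upscaling_mode == "raw" || upscaling_mode == "processed"
  let n : Int := if capped ∧ feature_blocks > 1 then 1 else feature_blocks
  if n ≤ 0 then pos
  else
    match overwrite_strides with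
    | none => pos * 2 ^ n.toNat
    | some strides =>
      pos * (PySem.List.slice strides none (some n)).reverse.foldl
              (fun factor stride => stride * factor) 1

-- ===== PRECONDITION & SPEC =====
-- Pre_ excludes only inputs where A raises IndexError: an overwrite_strides list shorter than the loop's upper limit.
def Pre_feature_to_image_coordinates (pos : Int) (feature_blocks : Int) (overwrite_strides : Option (List Int)) (upscaling_mode : String) : Prop :=
  overwrite_strides = none ∨
    (if upscaling_mode = "raw" ∨ upscaling_mode = "processed" then min 1 feature_blocks else feature_blocks)
      ≤ ((overwrite_strides.getD []).length : Int)
instance (pos : Int) (feature_blocks : Int) (overwrite_strides : Option (List Int)) (upscaling_mode : String) : Decidable (Pre_feature_to_image_coordinates pos feature_blocks overwrite_strides upscaling_mode) := by unfold Pre_feature_to_image_coordinates; infer_instance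
def pvWitness_feature_to_image_coordinates : Int × Int × Option (List Int) × String := (3, 2, some [2, 3], "none")


def Spec_feature_to_image_coordinates (pos : Int) (feature_blocks : Int) (overwrite_strides : Option (List Int)) (upscaling_mode : String) (out : Int) : Prop := out = feature_to_image_coordinates_alt pos feature_blocks overwrite_strides upscaling_mode
instance (pos : Int) (feature_blocks : Int) (overwrite_strides : Option (List Int)) (upscaling_mode : String) (out : Int) : Decidable (Spec_feature_to_image_coordinates pos feature_blocks overwrite_strides upscaling_mode out) := by unfold Spec_feature_to_image_coordinates; infer_instance

-- ===== CLAIM (what is proved, stated in full; the proofs are below) =====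
def Claim_equal_feature_to_image_coordinates : Prop := ∀ (pos : Int) (feature_blocks : Int) (overwrite_strides : Option (List Int)) (upscaling_mode : String), Dom_feature_to_image_coordinates pos feature_blocks overwrite_strides upscaling_mode → Pre_feature_to_image_coordinates pos feature_blocks overwrite_strides upscaling_mode → Spec_feature_to_image_coordinates pos feature_blocks overwrite_strides upscaling_mode (feature_to_image_coordinates pos feature_blocks overwrite_strides upscaling_mode)

-- ===== LEMMAS AND PROOFS =====

-- A's two upper_limit expressions compute the same bound.
theorem n_eq (c : Bool) (fb : Int) :
    (if c ∧ fb > 1 then (1 : Int) else fb) = (if c = true then min 1 fb else fb) := by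
  by_cases hc : c = true <;> simp [hc] <;> omega

-- A's loop with no overwrite: doubling |xs| times multiplies by 2^|xs|.
theorem foldl_double (xs : List Int) (a : Int) :
    xs.foldl (fun r (_ : Int) => r * 2) a = a * 2 ^ xs.length := by
  induction xs generalizing a with
  | nil => simp
  | cons x xs ih => simp [List.foldl, ih, pow_succ]; ring

-- Pull the initial accumulator out of a product fold.
theorem foldl_mul_pull (xs : List Int) (a : Int) :
    xs.foldl (fun r s => r * s) a = a * xs.foldl (fun r s => r * s) 1 := by
  induction xs generalizing a with
  | nil => simp
  | cons x xs ih =>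
    simp only [List.foldl]
    rw [ih (a * x), ih (1 * x)]
    ring

-- On a commutative monoid the right fold of (*) equals the left fold.
theorem foldr_mul_eq_foldl (xs : List Int) :
    xs.foldr (fun s f => s * f) 1 = xs.foldl (fun r s => r * s) 1 := by
  induction xs with
  | nil => rfl
  | cons x xs ih =>
    simp only [List.foldr, List.foldl]
    rw [ih, foldl_mul_pull xs (1 * x)]
    ring

-- ===== VERDICT (by name: the statement is the Claim_ definition above) =====
theorem feature_to_image_coordinates_spec : Claim_equal_feature_to_image_coordinates := by
  intro pos fb ows mode _dom hpre
  unfold Spec_feature_to_image_coordinates feature_to_image_coordinates feature_to_image_coordinates_alt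
  set n : Int := if mode = "raw" ∨ mode = "processed" then min 1 fb else fb with hn
  have hnb : (if (mode == "raw" || mode == "processed") ∧ fb > 1 then (1 : Int) else fb) = n := by
    rw [n_eq]; simp [hn]
  simp only [hnb]
  by_cases hle : n ≤ 0
  · rw [PySem.List.pyRange_one_eq_nil (by omega), if_pos hle]
    simp
  · rw [if_neg hle]
    match ows with
    | none =>
      simp only
      rw [foldl_double, PySem.List.length_pyRange_one]
      simp
    | some l =>
      have hlen : n ≤ (l.length : Int) := by
        rcases hpre with h | h
        · exact absurd h (by simp)
        · simpa using h
      simp only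
      have htake : (l.take n.toNat).length = n.toNat := by
        rw [List.length_take]; omega
      have hcongr :
          (PySem.List.pyRange 0 n 1).foldl (fun result i => result * PySem.List.pyGetD l i 0) pos
            = (PySem.List.pyRange 0 n 1).foldl (fun result i => result * PySem.List.pyGetD (l.take n.toNat) i 0) pos := by
        apply PySem.List.foldl_congr_mem
        intro acc i hi
        rw [PySem.List.mem_pyRange_one] at hi
        have h1 : i < ((l.take n.toNat).length : Int) := by rw [htake]; omega
        rw [PySem.List.pyGetD_eq_getElem (xs := l) (h0 := hi.1) (h1 := by omega),
            PySem.List.pyGetD_eq_getElem (xs := l.take n.toNat) (h0 := hi.1) (h1 := h1)]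
        rw [List.getElem_take]
      have key : ∀ (t : List Int), (t.length : Int) = n →
          (PySem.List.pyRange 0 n 1).foldl (fun result i => result * PySem.List.pyGetD t i 0) pos
            = pos * t.foldl (fun r s => r * s) 1 := by
        intro t ht
        rw [← ht, ← PySem.List.len_eq,
            PySem.List.foldl_pyRange_zero_pyGetD t 0 (fun r s => r * s) pos,
            foldl_mul_pull]
      rw [hcongr, PySem.List.slice_to (xs := l) (b := n) (by omega), List.foldl_reverse]
      simp only [foldr_mul_eq_foldl]
      exact key (l.take n.toNat) (by rw [htake]; omega)
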